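-- pv_equiv track=rewrite | github.com/zZakariaRIahi/Takeoffs | app/extractors/sheet_indexer.py | _detect_discipline
-- ===== SOURCE A (Python) =====
-- from typing import Any, Dict, List, Optional, Tuple
--
-- _PREFIX_MAP: Dict[str, str] = {
--     "AD": "Architectural Demolition",
--     "A":  "Architectural",
--     "S":  "Structural",
--     "D":  "Demolition",
--     "M":  "Mechanical",
--     "E":  "Electrical",
--     "P":  "Plumbing",
--     "FP": "Fire Protection",
--     "L":  "Landscape",
--     "C":  "Civil",
--     "G":  "General",
--     "T":  "Title/Index",
--     "I":  "Interior",
-- }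
--
-- def _detect_discipline(sheet_id: str, text: str) -> str:
--     """Detect drawing discipline from sheet ID prefix."""
--     sid = sheet_id.upper()
--
--     if sid.startswith("PAGE-"):
--         text_l = text.lower()
--         if "specification" in text_l or "division" in text_l:
--             return "Specification"
--         return "Unknown"
--
--     # Check multi-char prefixes first (AD, FP)
--     for prefix in sorted(_PREFIX_MAP, key=len, reverse=True):
--         if sid.startswith(prefix):
--             return _PREFIX_MAP[prefix]
--
--     return "Unknown"
-- ===== SOURCE B (Python) =====
-- _TWO_CHAR = {
--     "AD": "Architectural Demolition",
--     "FP": "Fire Protection",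
-- }
--
-- _ONE_CHAR = {
--     "A": "Architectural",
--     "S": "Structural",
--     "D": "Demolition",
--     "M": "Mechanical",
--     "E": "Electrical",
--     "P": "Plumbing",
--     "L": "Landscape",
--     "C": "Civil",
--     "G": "General",
--     "T": "Title/Index",
--     "I": "Interior",
-- }
--
-- def _detect_discipline(sheet_id: str, text: str) -> str:
--     """Detect drawing discipline from sheet ID prefix."""
--     sid = sheet_id.upper()
--
--     if sid.startswith("PAGE-"):
--         text_l = text.lower()
--         if "specification" in text_l or "division" in text_l:
--             return "Specification"
--         return "Unknown"
--
--     two = sid[:2]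
--     if two in _TWO_CHAR:
--         return _TWO_CHAR[two]
--     one = sid[:1]
--     if one in _ONE_CHAR:
--         return _ONE_CHAR[one]
--     return "Unknown"
-- ===== Notes on version B (the rewrite author's own statement) =====
-- stated objective: simpler
-- what changed: The sorted-by-length startswith scan over the prefix map is eliminated entirely: the map is pre-split into a two-char and a one-char table and the body does two direct fixed-length slice lookups, no loop and no sort.
import Mathlib
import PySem

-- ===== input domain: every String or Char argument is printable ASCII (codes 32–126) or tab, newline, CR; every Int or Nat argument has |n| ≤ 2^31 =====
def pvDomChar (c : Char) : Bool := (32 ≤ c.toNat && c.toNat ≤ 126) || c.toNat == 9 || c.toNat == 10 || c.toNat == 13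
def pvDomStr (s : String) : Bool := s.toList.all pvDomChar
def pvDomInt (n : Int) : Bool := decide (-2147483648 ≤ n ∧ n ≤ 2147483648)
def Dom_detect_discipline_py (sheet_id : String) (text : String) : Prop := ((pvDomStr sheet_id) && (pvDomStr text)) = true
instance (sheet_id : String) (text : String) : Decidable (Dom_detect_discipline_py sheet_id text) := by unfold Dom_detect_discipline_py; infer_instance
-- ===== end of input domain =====

-- B replaces A's sorted-by-length startswith scan over the prefix map with two direct
-- fixed-length slice lookups in a pre-split two-char/one-char table (objective: simpler).

-- ===== PORT A =====

-- _PREFIX_MAP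
def pvPrefixMap : PySem.Dict String String := PySem.Dict.ofList
  [("AD","Architectural Demolition"), ("A","Architectural"), ("S","Structural"), ("D","Demolition"),
   ("M","Mechanical"), ("E","Electrical"), ("P","Plumbing"), ("FP","Fire Protection"),
   ("L","Landscape"), ("C","Civil"), ("G","General"), ("T","Title/Index"), ("I","Interior")]

-- 'for prefix in sorted(_PREFIX_MAP, key=len, reverse=True): if sid.startswith(prefix): return _PREFIX_MAP[prefix]'
-- (the key is always present, so the .getD "" default of the lookup is never used)
def pvScanA (sid : String) : List String → String
  | [] => "Unknown"
  | p :: rest =>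
    if PySem.Str.startswith sid p then (PySem.Dict.get? pvPrefixMap p).getD "" else pvScanA sid rest

def detect_discipline_py (sheet_id : String) (text : String) : String :=
  let sid := PySem.Str.upper sheet_id
  if PySem.Str.startswith sid "PAGE-" then
    let text_l := PySem.Str.lower text
    if PySem.Str.isIn "specification" text_l || PySem.Str.isIn "division" text_l then "Specification"
    else "Unknown"
  else
    pvScanA sid (PySem.List.sorted (PySem.Dict.keys pvPrefixMap) (fun p => PySem.Str.len p) true)

-- ===== PORT B =====

-- _TWO_CHAR
def pvTwoChar : PySem.Dict String String := PySem.Dict.ofList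
  [("AD","Architectural Demolition"), ("FP","Fire Protection")]

-- _ONE_CHAR
def pvOneChar : PySem.Dict String String := PySem.Dict.ofList
  [("A","Architectural"), ("S","Structural"), ("D","Demolition"), ("M","Mechanical"),
   ("E","Electrical"), ("P","Plumbing"), ("L","Landscape"), ("C","Civil"),
   ("G","General"), ("T","Title/Index"), ("I","Interior")]

-- the prefix-table part of B's body:
-- two = sid[:2]; if two in _TWO_CHAR: return _TWO_CHAR[two]; one = sid[:1]; if one in _ONE_CHAR: return _ONE_CHAR[one]; return "Unknown"
def pvProbeB (sid : String) : String :=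
  let two := PySem.Str.slice sid none (some 2)
  match PySem.Dict.get? pvTwoChar two with
  | some v => v
  | none =>
    let one := PySem.Str.slice sid none (some 1)
    match PySem.Dict.get? pvOneChar one with
    | some v => v
    | none => "Unknown"

def detect_discipline_py_alt (sheet_id : String) (text : String) : String :=
  let sid := PySem.Str.upper sheet_id
  if PySem.Str.startswith sid "PAGE-" then
    let text_l := PySem.Str.lower text
    if PySem.Str.isIn "specification" text_l || PySem.Str.isIn "division" text_l then "Specification"
    else "Unknown"
  else
    pvProbeB sid

-- ===== PRECONDITION & SPEC =====
def Spec_detect_discipline_py (sheet_id : String) (text : String) (out : String) : Prop := out = detect_discipline_py_alt sheet_id text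
instance (sheet_id : String) (text : String) (out : String) : Decidable (Spec_detect_discipline_py sheet_id text out) := by unfold Spec_detect_discipline_py; infer_instance

-- ===== CLAIM (what is proved, stated in full; the proofs are below) =====
def Claim_equal_detect_discipline_py : Prop := ∀ (sheet_id : String) (text : String), Dom_detect_discipline_py sheet_id text → Spec_detect_discipline_py sheet_id text (detect_discipline_py sheet_id text)

-- ===== LEMMAS AND PROOFS =====

-- A's scan over the length-sorted key list equals B's two fixed-length table probes.
set_option maxHeartbeats 1000000 in
theorem pvScanA_eq_probes (sid : String) :
    pvScanA sid ["AD","FP","A","S","D","M","E","P","L","C","G","T","I"] = pvProbeB sid := by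
  unfold pvProbeB
  have e1 : ∀ p : String, PySem.Str.startswith sid p = PySem.Chars.startswith sid.toList p.toList := by
    simp [pysem]
  have key : ∀ (k : Int) (p : String), 0 ≤ k → ((PySem.Str.slice sid none (some k) = p) ↔ sid.toList.take k.toNat = p.toList) := by
    intro k p hk
    rw [← String.toList_inj]
    simp [pysem, PySem.List.slice_to _ hk]
  simp only [pvScanA, e1,
    show (PySem.Dict.get? pvPrefixMap "AD").getD "" = "Architectural Demolition" from by decide,
    show (PySem.Dict.get? pvPrefixMap "FP").getD "" = "Fire Protection" from by decide,
    show (PySem.Dict.get? pvPrefixMap "A").getD "" = "Architectural" from by decide,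
    show (PySem.Dict.get? pvPrefixMap "S").getD "" = "Structural" from by decide,
    show (PySem.Dict.get? pvPrefixMap "D").getD "" = "Demolition" from by decide,
    show (PySem.Dict.get? pvPrefixMap "M").getD "" = "Mechanical" from by decide,
    show (PySem.Dict.get? pvPrefixMap "E").getD "" = "Electrical" from by decide,
    show (PySem.Dict.get? pvPrefixMap "P").getD "" = "Plumbing" from by decide,
    show (PySem.Dict.get? pvPrefixMap "L").getD "" = "Landscape" from by decide,
    show (PySem.Dict.get? pvPrefixMap "C").getD "" = "Civil" from by decide,
    show (PySem.Dict.get? pvPrefixMap "G").getD "" = "General" from by decide,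
    show (PySem.Dict.get? pvPrefixMap "T").getD "" = "Title/Index" from by decide,
    show (PySem.Dict.get? pvPrefixMap "I").getD "" = "Interior" from by decide]
  rw [show pvTwoChar = PySem.Dict.mk [("AD","Architectural Demolition"), ("FP","Fire Protection")] from by decide,
      show pvOneChar = PySem.Dict.mk [("A","Architectural"), ("S","Structural"), ("D","Demolition"), ("M","Mechanical"),
        ("E","Electrical"), ("P","Plumbing"), ("L","Landscape"), ("C","Civil"),
        ("G","General"), ("T","Title/Index"), ("I","Interior")] from by decide]
  simp only [PySem.Dict.get?_mk_cons, beq_iff_eq, eq_comm (b := PySem.Str.slice sid none (some 1)),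
    eq_comm (b := PySem.Str.slice sid none (some 2)),
    key 1 _ (by norm_num), key 2 _ (by norm_num)]
  have st : ∀ p : List Char, (PySem.Chars.startswith sid.toList p = true) ↔ sid.toList.take p.length = p := by
    intro p
    rw [PySem.Chars.startswith_iff, List.prefix_iff_eq_take, eq_comm]
  simp only [show ∀ x : String, (PySem.Dict.mk ([] : List (String × String))).get? x = none from fun _ => rfl,
    show Int.toNat 2 = 2 from rfl, show Int.toNat 1 = 1 from rfl, st,
    show "AD".toList = ['A','D'] from rfl, show "FP".toList = ['F','P'] from rfl,
    show "A".toList = ['A'] from rfl, show "S".toList = ['S'] from rfl,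
    show "D".toList = ['D'] from rfl, show "M".toList = ['M'] from rfl,
    show "E".toList = ['E'] from rfl, show "P".toList = ['P'] from rfl,
    show "L".toList = ['L'] from rfl, show "C".toList = ['C'] from rfl,
    show "G".toList = ['G'] from rfl, show "T".toList = ['T'] from rfl,
    show "I".toList = ['I'] from rfl, show List.length ['A','D'] = 2 from rfl, show List.length ['F','P'] = 2 from rfl,
    show ∀ c : Char, List.length [c] = 1 from fun _ => rfl]
  by_cases h0 : List.take 2 sid.toList = ['A','D']
  · simp only [if_pos h0]
  simp only [if_neg h0]
  by_cases h1 : List.take 2 sid.toList = ['F','P']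
  · simp only [if_pos h1]
  simp only [if_neg h1]
  by_cases h2 : List.take 1 sid.toList = ['A']
  · simp only [if_pos h2]
  simp only [if_neg h2]
  by_cases h3 : List.take 1 sid.toList = ['S']
  · simp only [if_pos h3]
  simp only [if_neg h3]
  by_cases h4 : List.take 1 sid.toList = ['D']
  · simp only [if_pos h4]
  simp only [if_neg h4]
  by_cases h5 : List.take 1 sid.toList = ['M']
  · simp only [if_pos h5]
  simp only [if_neg h5]
  by_cases h6 : List.take 1 sid.toList = ['E']
  · simp only [if_pos h6]
  simp only [if_neg h6]
  by_cases h7 : List.take 1 sid.toList = ['P']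
  · simp only [if_pos h7]
  simp only [if_neg h7]
  by_cases h8 : List.take 1 sid.toList = ['L']
  · simp only [if_pos h8]
  simp only [if_neg h8]
  by_cases h9 : List.take 1 sid.toList = ['C']
  · simp only [if_pos h9]
  simp only [if_neg h9]
  by_cases h10 : List.take 1 sid.toList = ['G']
  · simp only [if_pos h10]
  simp only [if_neg h10]
  by_cases h11 : List.take 1 sid.toList = ['T']
  · simp only [if_pos h11]
  simp only [if_neg h11]
  by_cases h12 : List.take 1 sid.toList = ['I']
  · simp only [if_pos h12]
  simp only [if_neg h12]

-- Python's sorted(_PREFIX_MAP, key=len, reverse=True), evaluated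
theorem pv_sorted_keys : PySem.List.sorted (PySem.Dict.keys pvPrefixMap) (fun p => PySem.Str.len p) true
    = ["AD","FP","A","S","D","M","E","P","L","C","G","T","I"] := by decide

theorem pv_main (sheet_id text : String) :
    detect_discipline_py sheet_id text = detect_discipline_py_alt sheet_id text := by
  unfold detect_discipline_py detect_discipline_py_alt
  rw [pv_sorted_keys]
  by_cases h : PySem.Str.startswith (PySem.Str.upper sheet_id) "PAGE-" = true
  · rw [if_pos h, if_pos h]
  · rw [if_neg h, if_neg h]
    exact pvScanA_eq_probes _

-- ===== VERDICT (by name: the statement is the Claim_ definition above) =====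
theorem detect_discipline_py_spec : Claim_equal_detect_discipline_py := by
  intro sheet_id text _
  unfold Spec_detect_discipline_py
  exact pv_main sheet_id text
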